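-- pv_equiv track=rewrite | github.com/adanzl/leetcode-practice | py/q2000/Q2019.py | scoreOfStudents
-- ===== SOURCE A (Python) =====
-- from functools import cache
-- from itertools import product
-- from typing import List
--
-- def scoreOfStudents(s: str, answers: List[int]) -> int:
--
--     @cache
--     def dfs(l, r):
--         if l == r:
--             return set([int(s[l])])
--         ret = set()
--         for i in range(l + 1, r, 2):
--             vs0 = dfs(l, i - 1)
--             vs1 = dfs(i + 1, r)
--             for v0, v1 in product(vs0, vs1):
--                 vv = (v0 + v1) if s[i] == '+' else (v0 * v1)
--                 if vv <= 1000: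
--                     ret.add(vv)
--         return ret
--
--     ss = dfs(0, len(s) - 1)
--     q = []
--     op = '+'
--     for c in s:
--         if c.isdigit():
--             v = int(c)
--             if op == '*':
--                 v *= q.pop()
--             q.append(v)
--         else:
--             op = c
--     valid_ans = sum(q)
--     ss.discard(valid_ans)
--     ans = 0
--     for a in answers:
--         if a in ss:
--             ans += 2
--         if a == valid_ans:
--             ans += 5
--     return ans
-- ===== SOURCE B (Python) =====
-- from typing import List
--
--
-- def scoreOfStudents(s: str, answers: List[int]) -> int:
--     # Bottom-up interval DP over digit indices instead of top-down cached recursion;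
--     # running total/current-product fold instead of the stack loop.
--     n = len(s)
--     if n % 2 == 1:
--         digits = [int(s[i]) for i in range(0, n, 2)]
--         ops = [s[i] for i in range(1, n, 2)]
--         m = len(digits)
--         dp = {}
--         for j in range(m):
--             dp[(j, j)] = {digits[j]}
--         for span in range(2, m + 1):
--             for j in range(0, m - span + 1):
--                 k = j + span - 1
--                 acc = set()
--                 for t in range(j, k):
--                     for x in dp[(j, t)]:
--                         for y in dp[(t + 1, k)]:
--                             v = x + y if ops[t] == '+' else x * y
--                             if v <= 1000:
--                                 acc.add(v)
--                 dp[(j, k)] = acc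
--         achievable = dp[(0, m - 1)]
--     else:
--         # an even-length string has no complete digit/operator parse, so no value is achievable
--         achievable = set()
--     total, cur, mult = 0, None, False
--     for ch in s:
--         if ch.isdigit():
--             d = int(ch)
--             if mult and cur is not None:
--                 cur = cur * d
--             else:
--                 if cur is not None:
--                     total += cur
--                 cur = d
--         else:
--             mult = ch == '*'
--     valid = total + (cur if cur is not None else 0)
--     achievable.discard(valid)
--     ans = 5 * answers.count(valid)
--     for a in answers:
--         if a in achievable:
--             ans += 2
--     return ans
-- ===== Notes on version B (the rewrite author's own statement) =====
-- stated objective: alternative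
-- what changed: Replaced the top-down @cache recursion over character intervals with a bottom-up interval DP over digit indices in a (j,k)-keyed table (with the empty set for even-length strings, which admit no complete parse), replaced the stack-based evaluation of the valid answer with a running total/current-product fold, and split the scoring into 5*count plus a membership pass.
import Mathlib
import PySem

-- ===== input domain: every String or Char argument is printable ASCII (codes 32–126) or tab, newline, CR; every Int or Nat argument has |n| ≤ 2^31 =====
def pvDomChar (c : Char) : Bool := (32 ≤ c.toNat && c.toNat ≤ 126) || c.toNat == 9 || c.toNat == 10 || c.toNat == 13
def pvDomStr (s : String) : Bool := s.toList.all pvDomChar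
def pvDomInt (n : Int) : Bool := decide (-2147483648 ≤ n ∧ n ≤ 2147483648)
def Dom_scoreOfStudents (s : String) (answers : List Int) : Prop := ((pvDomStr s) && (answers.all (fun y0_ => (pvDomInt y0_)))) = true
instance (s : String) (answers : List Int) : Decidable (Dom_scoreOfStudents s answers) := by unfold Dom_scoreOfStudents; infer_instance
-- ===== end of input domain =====

-- B replaces A's top-down cached recursion over character intervals by a bottom-up
-- interval DP over digit indices (empty for even-length strings, which admit no parse),
-- a running total/current-product fold for the valid answer instead of A's stack loop,
-- and 5*count plus a membership pass for the scoring (objective: alternative).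

-- int(c) for a single character (shared Python built-in); 0 is a dummy for the
-- ValueError case, which Pre_ excludes.
def pvIntCh (c : Char) : Int := (PySem.Int.ofChars? [c]).getD 0

-- s[i] for 0 ≤ i < len(s); ' ' is a dummy for the IndexError case (excluded by Pre_).
def pvSget (cs : List Char) (i : Int) : Char := (PySem.List.pyGet? cs i).getD ' '

-- ===== PORT A =====
-- dfs(l, r): @cache only memoizes, the computed sets are those of the plain recursion;
-- fuel makes the recursion structural (callers pass enough fuel for every call Python makes).
def pvDfsA (cs : List Char) : Nat → Int → Int → PySem.Set Int
  | 0, _, _ => PySem.Set.empty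
  | fuel + 1, l, r =>
    if l == r then
      PySem.Set.add PySem.Set.empty (pvIntCh (pvSget cs l))
    else
      (PySem.List.pyRange (l + 1) r 2).foldl (fun ret i =>
        let vs0 := pvDfsA cs fuel l (i - 1)
        let vs1 := pvDfsA cs fuel (i + 1) r
        vs0.foldl (fun ret v0 =>
          vs1.foldl (fun ret v1 =>
            let vv := if pvSget cs i == '+' then v0 + v1 else v0 * v1
            if vv ≤ 1000 then PySem.Set.add ret vv else ret) ret) ret) PySem.Set.empty

-- the q/op loop computing valid_ans; q.pop() on an empty q is an IndexError in Python
-- (excluded by Pre_), the port then appends v unchanged.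
def pvLoopA (cs : List Char) : List Int × Char :=
  cs.foldl (fun (st : List Int × Char) c =>
    if PySem.Chars.isdigit c then
      let v := pvIntCh c
      if st.2 == '*' then
        match PySem.List.pop? st.1 with
        | some (x, rest) => (rest ++ [v * x], st.2)
        | none => (st.1 ++ [v], st.2)
      else (st.1 ++ [v], st.2)
    else (st.1, c)) ([], '+')

def scoreOfStudents (s : String) (answers : List Int) : Int :=
  let cs := s.toList
  let ss := pvDfsA cs cs.length 0 (PySem.Str.len s - 1)
  let validAns := (pvLoopA cs).1.sum
  let ss := PySem.Set.discard ss validAns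
  answers.foldl (fun ans a =>
    let ans := if PySem.Set.contains ss a then ans + 2 else ans
    if a == validAns then ans + 5 else ans) 0

-- ===== PORT B =====
def pvDigitsB (cs : List Char) : List Int :=
  (PySem.List.pyRange 0 cs.length 2).map (fun i => pvIntCh (pvSget cs i))

def pvOpsB (cs : List Char) : List Char :=
  (PySem.List.pyRange 1 cs.length 2).map (fun i => pvSget cs i)

-- the acc set for one dp cell (j,k); dp[(j,t)] on a missing key is a KeyError in
-- Python (never reached), the port reads the empty set there.
def pvCellB (ops : List Char) (dp : PySem.Dict (Int × Int) (PySem.Set Int)) (j k : Int) : PySem.Set Int :=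
  (PySem.List.pyRange j k 1).foldl (fun acc t =>
    (dp.getD (j, t) PySem.Set.empty).foldl (fun acc x =>
      (dp.getD (t + 1, k) PySem.Set.empty).foldl (fun acc y =>
        let v := if PySem.List.pyGetD ops t ' ' == '+' then x + y else x * y
        if v ≤ 1000 then PySem.Set.add acc v else acc) acc) acc) PySem.Set.empty

def pvDpB (digits : List Int) (ops : List Char) (m : Int) : PySem.Dict (Int × Int) (PySem.Set Int) :=
  let dp0 := (PySem.List.pyRange 0 m 1).foldl (fun dp j =>
    dp.insert (j, j) (PySem.Set.add PySem.Set.empty (PySem.List.pyGetD digits j 0))) PySem.Dict.empty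
  (PySem.List.pyRange 2 (m + 1) 1).foldl (fun dp span =>
    (PySem.List.pyRange 0 (m - span + 1) 1).foldl (fun dp j =>
      let k := j + span - 1
      dp.insert (j, k) (pvCellB ops dp j k)) dp) dp0

def scoreOfStudents_alt (s : String) (answers : List Int) : Int :=
  let cs := s.toList
  let n := PySem.Str.len s
  let achievable :=
    if PySem.Int.mod n 2 == 1 then
      let digits := pvDigitsB cs
      let ops := pvOpsB cs
      let m : Int := PySem.List.len digits
      let dp := pvDpB digits ops m
      dp.getD (0, m - 1) PySem.Set.empty
    else
      -- an even-length string has no complete digit/operator parse, so nothing is achievable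
      PySem.Set.empty
  let st := cs.foldl (fun (st : Int × Option Int × Bool) ch =>
    if PySem.Chars.isdigit ch then
      let d := pvIntCh ch
      if st.2.2 && st.2.1.isSome then
        (st.1, st.2.1.map (· * d), st.2.2)
      else
        ((if st.2.1.isSome then st.1 + st.2.1.getD 0 else st.1), some d, st.2.2)
    else (st.1, st.2.1, ch == '*')) (0, none, false)
  let validAns := st.1 + st.2.1.getD 0
  let achievable := PySem.Set.discard achievable validAns
  let ans : Int := 5 * (PySem.List.count answers validAns : Int)
  answers.foldl (fun ans a => if PySem.Set.contains achievable a then ans + 2 else ans) ans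

-- ===== PRECONDITION & SPEC =====
-- Pre_ is exactly the set of inputs on which A returns (no exception): every base
-- position that A's recursion can reach (all even positions for odd length, even
-- positions up to len-4 for even length) holds a digit (else int() raises ValueError),
-- and the first digit of s is not directly preceded by a '*' (else q.pop() raises
-- IndexError on the empty stack).
def pvOkBases (cs : List Char) : Bool :=
  (List.range (if cs.length % 2 == 1 then (cs.length + 1) / 2 else (cs.length - 1) / 2)).all
    (fun t => PySem.Chars.isdigit (cs.getD (2 * t) ' '))

def pvOkStart (cs : List Char) : Bool :=
  match cs.findIdx? (fun c => PySem.Chars.isdigit c) with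
  | none => true
  | some f => f == 0 || !(cs.getD (f - 1) ' ' == '*')

def Pre_scoreOfStudents (s : String) (answers : List Int) : Prop :=
  (pvOkBases s.toList && pvOkStart s.toList) = true

instance (s : String) (answers : List Int) : Decidable (Pre_scoreOfStudents s answers) := by
  unfold Pre_scoreOfStudents; infer_instance

def pvWitness_scoreOfStudents : String × List Int := ("1+2*3", [7, 5])

def Spec_scoreOfStudents (s : String) (answers : List Int) (out : Int) : Prop := out = scoreOfStudents_alt s answers
instance (s : String) (answers : List Int) (out : Int) : Decidable (Spec_scoreOfStudents s answers out) := by unfold Spec_scoreOfStudents; infer_instance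

-- ===== CLAIM (what is proved, stated in full; the proofs are below) =====
def Claim_equal_scoreOfStudents : Prop := ∀ (s : String) (answers : List Int), Dom_scoreOfStudents s answers → Pre_scoreOfStudents s answers → Spec_scoreOfStudents s answers (scoreOfStudents s answers)

-- ===== LEMMAS AND PROOFS =====

-- the reference interval sets, by well-founded recursion on the digit-index span
def pvCombine (acc vs0 vs1 : PySem.Set Int) (c : Char) : PySem.Set Int :=
  vs0.foldl (fun acc x =>
    vs1.foldl (fun acc y =>
      let v := if c == '+' then x + y else x * y
      if v ≤ 1000 then PySem.Set.add acc v else acc) acc) acc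

def pvG (ds : List Int) (os : List Char) (j k : Nat) : PySem.Set Int :=
  if h : k ≤ j then
    PySem.Set.add PySem.Set.empty (ds.getD j 0)
  else
    (List.range (k - j)).attach.foldl (fun acc dt =>
      pvCombine acc (pvG ds os j (j + dt.1)) (pvG ds os (j + dt.1 + 1) k)
        (os.getD (j + dt.1) ' ')) PySem.Set.empty
termination_by k - j
decreasing_by
  · have := List.mem_range.mp dt.2; omega
  · have := List.mem_range.mp dt.2; omega

theorem pvG_base (ds : List Int) (os : List Char) (j : Nat) :
    pvG ds os j j = PySem.Set.add PySem.Set.empty (ds.getD j 0) := by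
  rw [pvG]; simp

theorem pvG_step (ds : List Int) (os : List Char) (j k : Nat) (h : j < k) :
    pvG ds os j k = (List.range (k - j)).foldl (fun acc dt =>
      pvCombine acc (pvG ds os j (j + dt)) (pvG ds os (j + dt + 1) k)
        (os.getD (j + dt) ' ')) PySem.Set.empty := by
  rw [pvG]; rw [dif_neg (by omega)]
  exact List.foldl_attach (f := fun acc dt =>
    pvCombine acc (pvG ds os j (j + dt)) (pvG ds os (j + dt + 1) k) (os.getD (j + dt) ' '))

-- ---- index bookkeeping ----

theorem pvSget_natCast (cs : List Char) (n : Nat) :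
    pvSget cs (n : Int) = cs.getD n ' ' := by
  simp [pvSget, List.getD]

theorem getD_map_range {β : Type} (f : Nat → β) (n t : Nat) (d : β) (h : t < n) :
    (((List.range n).map f).getD t d) = f t := by
  rw [List.getD_eq_getElem?_getD]
  simp [h]

theorem pvDigitsB_eq (cs : List Char) :
    pvDigitsB cs = (List.range ((cs.length + 1) / 2)).map (fun t => pvIntCh (cs.getD (2 * t) ' ')) := by
  unfold pvDigitsB
  rw [PySem.List.pyRange_of_pos 0 (cs.length : Int) (by norm_num)]
  rw [List.map_map]
  by_cases h0 : 0 < (cs.length : Int)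
  · rw [if_pos h0]
    have hcount : (((cs.length : Int) - 0 + 2 - 1) / 2).toNat = (cs.length + 1) / 2 := by
      have : ((cs.length : Int) - 0 + 2 - 1) = ((cs.length + 1 : Nat) : Int) := by push_cast; ring
      rw [this]
      omega
    rw [hcount]
    apply List.map_congr_left
    intro t ht
    have : (0 : Int) + 2 * (t : Int) = ((2 * t : Nat) : Int) := by push_cast; ring
    simp only [Function.comp_apply, this, pvSget_natCast]
  · rw [if_neg h0]
    have : cs.length = 0 := by omega
    simp [this]

theorem pvOpsB_eq (cs : List Char) :
    pvOpsB cs = (List.range (cs.length / 2)).map (fun t => cs.getD (2 * t + 1) ' ') := by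
  unfold pvOpsB
  rw [PySem.List.pyRange_of_pos 1 (cs.length : Int) (by norm_num)]
  rw [List.map_map]
  by_cases h0 : 1 < (cs.length : Int)
  · rw [if_pos h0]
    have hcount : (((cs.length : Int) - 1 + 2 - 1) / 2).toNat = cs.length / 2 := by
      have : ((cs.length : Int) - 1 + 2 - 1) = ((cs.length : Nat) : Int) := by push_cast; ring
      rw [this]
      omega
    rw [hcount]
    apply List.map_congr_left
    intro t ht
    have : (1 : Int) + 2 * (t : Int) = ((2 * t + 1 : Nat) : Int) := by push_cast; ring
    simp only [Function.comp_apply, this, pvSget_natCast]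
  · rw [if_neg h0]
    have : cs.length / 2 = 0 := by omega
    simp [this]

theorem pvDigitsB_len (cs : List Char) : (pvDigitsB cs).length = (cs.length + 1) / 2 := by
  rw [pvDigitsB_eq]; simp

theorem pvDigitsB_getD (cs : List Char) (t : Nat) (h : t < (cs.length + 1) / 2) :
    (pvDigitsB cs).getD t 0 = pvIntCh (cs.getD (2 * t) ' ') := by
  rw [pvDigitsB_eq]; exact getD_map_range _ _ _ _ h

theorem pvOpsB_getD (cs : List Char) (t : Nat) (h : t < cs.length / 2) :
    (pvOpsB cs).getD t ' ' = cs.getD (2 * t + 1) ' ' := by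
  rw [pvOpsB_eq]; exact getD_map_range _ _ _ _ h

theorem pvDfsA_eq_G (cs : List Char) (hodd : cs.length % 2 = 1) :
    ∀ (fuel : Nat) (j k : Nat) (l r : Int), l = ((2 * j : Nat) : Int) → r = ((2 * k : Nat) : Int) →
      j ≤ k → 2 * k < cs.length → k - j + 1 ≤ fuel →
      pvDfsA cs fuel l r = pvG (pvDigitsB cs) (pvOpsB cs) j k := by
  intro fuel
  induction fuel with
  | zero => intro j k l r _ _ _ _ h5; omega
  | succ f ih =>
    intro j k l r hl hr hjk hk hfuel
    subst hl hr
    by_cases hje : j = k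
    · subst hje
      rw [pvDfsA]
      rw [if_pos (by simp)]
      rw [pvG_base, pvSget_natCast]
      rw [pvDigitsB_getD cs j (by omega)]
    · have hjk' : j < k := lt_of_le_of_ne hjk hje
      rw [pvDfsA]
      rw [if_neg (by simp; omega)]
      have hrange : PySem.List.pyRange (((2 * j : Nat) : Int) + 1) ((2 * k : Nat) : Int) 2
          = (List.range (k - j)).map (fun (q : Nat) => ((2 * j : Nat) : Int) + 1 + 2 * (q : Int)) := by
        rw [PySem.List.pyRange_of_pos _ _ (by norm_num)]
        rw [if_pos (by push_cast; omega)]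
        have hcnt : ((((2 * k : Nat) : Int)) - (((2 * j : Nat) : Int) + 1) + 2 - 1) / 2 = ((k - j : Nat) : Int) := by
          omega
        rw [hcnt, Int.toNat_natCast]
      rw [hrange, List.foldl_map]
      rw [pvG_step (pvDigitsB cs) (pvOpsB cs) j k hjk']
      apply PySem.List.foldl_congr_mem
      intro acc q hq
      have hq' : q < k - j := List.mem_range.mp hq
      have e0 : ((2 * j : Nat) : Int) + 1 + 2 * (q : Int) - 1 = ((2 * (j + q) : Nat) : Int) := by
        push_cast; ring
      have e1 : ((2 * j : Nat) : Int) + 1 + 2 * (q : Int) + 1 = ((2 * (j + q + 1) : Nat) : Int) := by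
        push_cast; ring
      have echar : pvSget cs (((2 * j : Nat) : Int) + 1 + 2 * (q : Int)) = (pvOpsB cs).getD (j + q) ' ' := by
        rw [show ((2 * j : Nat) : Int) + 1 + 2 * (q : Int) = ((2 * (j + q) + 1 : Nat) : Int) by push_cast; ring]
        rw [pvSget_natCast, pvOpsB_getD cs (j + q) (by omega)]
      rw [e0, e1, echar]
      rw [ih j (j + q) _ _ rfl rfl (by omega) (by omega) (by omega)]
      rw [ih (j + q + 1) k _ _ rfl rfl (by omega) hk (by omega)]
      rfl

-- ---- B's dp table computes the reference sets ----

def pvInv (ds : List Int) (os : List Char) (L : Nat)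
    (dp : PySem.Dict (Int × Int) (PySem.Set Int)) : Prop :=
  ∀ j k : Nat, j ≤ k → k < ds.length → k - j + 1 ≤ L →
    dp.getD ((j : Int), (k : Int)) PySem.Set.empty = pvG ds os j k

theorem pvCellB_eq (ds : List Int) (os : List Char) (L : Nat)
    (dp : PySem.Dict (Int × Int) (PySem.Set Int)) (hInv : pvInv ds os L dp)
    (j k : Nat) (hjk : j < k) (hk : k < ds.length) (hL : k - j ≤ L) :
    pvCellB os dp (j : Int) (k : Int) = pvG ds os j k := by
  unfold pvCellB
  have hkj : ((k : Int) - (j : Int)).toNat = k - j := by omega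
  rw [PySem.List.pyRange_one, hkj, List.foldl_map]
  rw [pvG_step ds os j k hjk]
  apply PySem.List.foldl_congr_mem
  intro acc dt hdt
  have hdt' : dt < k - j := List.mem_range.mp hdt
  have e1 : (j : Int) + (dt : Int) = ((j + dt : Nat) : Int) := by push_cast; ring
  rw [e1]
  rw [show ((j + dt : Nat) : Int) + 1 = ((j + dt + 1 : Nat) : Int) by push_cast; ring]
  rw [hInv j (j + dt) (by omega) (by omega) (by omega)]
  rw [hInv (j + dt + 1) k (by omega) hk (by omega)]
  rw [PySem.List.pyGetD_natCast]
  rfl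

theorem pvInv_init (ds : List Int) (os : List Char) :
    pvInv ds os 1 ((PySem.List.pyRange 0 (ds.length : Int) 1).foldl (fun dp j =>
      dp.insert (j, j) (PySem.Set.add PySem.Set.empty (PySem.List.pyGetD ds j 0))) PySem.Dict.empty) := by
  rw [PySem.List.pyRange_zero_natCast, List.foldl_map]
  have main : ∀ (n jq : Nat), jq < n →
      ((List.range n).foldl (fun dp (q : Nat) =>
        dp.insert (((q : Int)), (q : Int)) (PySem.Set.add PySem.Set.empty (PySem.List.pyGetD ds (q : Int) 0)))
        PySem.Dict.empty).getD (((jq : Int)), (jq : Int)) PySem.Set.empty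
      = PySem.Set.add PySem.Set.empty (PySem.List.pyGetD ds (jq : Int) 0) := by
    intro n
    induction n with
    | zero => intro jq h; omega
    | succ n ihn =>
      intro jq h
      rw [List.range_succ, List.foldl_append, List.foldl_cons, List.foldl_nil]
      rw [PySem.Dict.getD_insert]
      by_cases hj : jq = n
      · subst hj; rw [if_pos rfl]
      · rw [if_neg (by simp; omega)]
        exact ihn jq (by omega)
  intro j k hjk hk hL
  have hje : j = k := by omega
  subst hje
  rw [main ds.length j hk, pvG_base]
  rw [PySem.List.pyGetD_natCast]

theorem pvInv_row (ds : List Int) (os : List Char) (L : Nat) (hL : 1 ≤ L)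
    (hmn : L + 1 ≤ ds.length)
    (dp : PySem.Dict (Int × Int) (PySem.Set Int)) (hInv : pvInv ds os L dp) (span : Int)
    (hspan : span = ((L : Int) + 1)) :
    pvInv ds os (L + 1) ((PySem.List.pyRange 0 ((ds.length : Int) - span + 1) 1).foldl (fun dp j =>
      dp.insert (j, j + span - 1) (pvCellB os dp j (j + span - 1))) dp) := by
  subst hspan
  have hR : ((ds.length : Int) - ((L : Int) + 1) + 1) = ((ds.length - L : Nat) : Int) := by omega
  rw [hR, PySem.List.pyRange_zero_natCast, List.foldl_map]
  have main : ∀ (R : Nat), R + L ≤ ds.length →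
      pvInv ds os L ((List.range R).foldl (fun dp (q : Nat) =>
        dp.insert (((q : Int)), (q : Int) + ((L : Int) + 1) - 1)
          (pvCellB os dp (q : Int) ((q : Int) + ((L : Int) + 1) - 1))) dp)
      ∧ ∀ q : Nat, q < R →
        ((List.range R).foldl (fun dp (q : Nat) =>
          dp.insert (((q : Int)), (q : Int) + ((L : Int) + 1) - 1)
            (pvCellB os dp (q : Int) ((q : Int) + ((L : Int) + 1) - 1))) dp).getD
          (((q : Int)), ((q + L : Nat) : Int)) PySem.Set.empty = pvG ds os q (q + L) := by
    intro R
    induction R with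
    | zero =>
      intro _
      exact ⟨hInv, fun q hq => absurd hq (by omega)⟩
    | succ R ihR =>
      intro hRL
      obtain ⟨ih1, ih2⟩ := ihR (by omega)
      rw [List.range_succ, List.foldl_append, List.foldl_cons, List.foldl_nil]
      have ekey : (R : Int) + ((L : Int) + 1) - 1 = ((R + L : Nat) : Int) := by push_cast; ring
      have hcell : pvCellB os ((List.range R).foldl (fun dp (q : Nat) =>
            dp.insert (((q : Int)), (q : Int) + ((L : Int) + 1) - 1)
              (pvCellB os dp (q : Int) ((q : Int) + ((L : Int) + 1) - 1))) dp)
            (R : Int) ((R : Int) + ((L : Int) + 1) - 1) = pvG ds os R (R + L) := by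
        rw [ekey]
        exact pvCellB_eq ds os L _ ih1 R (R + L) (by omega) (by omega) (by omega)
      constructor
      · intro j k hjk hk hLspan
        rw [PySem.Dict.getD_insert]
        rw [if_neg (by rw [ekey]; simp; omega)]
        exact ih1 j k hjk hk hLspan
      · intro q hq
        rw [PySem.Dict.getD_insert]
        by_cases hqR : q = R
        · subst hqR
          rw [if_pos (by rw [ekey]), hcell]
        · rw [if_neg (by rw [ekey]; simp; omega)]
          exact ih2 q (by omega)
  intro j k hjk hk hLspan
  by_cases hsmall : k - j + 1 ≤ L
  · exact (main (ds.length - L) (by omega)).1 j k hjk hk hsmall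
  · have hkj : k = j + L := by omega
    subst hkj
    exact (main (ds.length - L) (by omega)).2 j (by omega)

theorem pvInv_outer (ds : List Int) (os : List Char) :
    ∀ (c : Nat) (S : Int) (L : Nat) (dp : PySem.Dict (Int × Int) (PySem.Set Int)),
      S = ((L : Int) + 1) → 1 ≤ L → ((ds.length : Int) + 1 - S) = (c : Int) →
      pvInv ds os L dp →
      pvInv ds os ds.length ((PySem.List.pyRange S ((ds.length : Int) + 1) 1).foldl (fun dp span =>
        (PySem.List.pyRange 0 ((ds.length : Int) - span + 1) 1).foldl (fun dp j =>
          dp.insert (j, j + span - 1) (pvCellB os dp j (j + span - 1))) dp) dp) := by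
  intro c
  induction c with
  | zero =>
    intro S L dp hS hL hc hInv
    rw [PySem.List.pyRange_one_eq_nil (by omega), List.foldl_nil]
    intro j k hjk hk hspan
    exact hInv j k hjk hk (by omega)
  | succ c ihc =>
    intro S L dp hS hL hc hInv
    rw [PySem.List.pyRange_one_cons (by omega), List.foldl_cons]
    have hrow := pvInv_row ds os L hL (by omega) dp hInv S hS
    exact ihc (S + 1) (L + 1) _ (by rw [hS]; push_cast; ring) (by omega) (by omega) hrow

theorem pvDpB_correct (ds : List Int) (os : List Char) (hm : 1 ≤ ds.length)
    (m : Int) (hmm : m = (ds.length : Int)) (j k : Nat) (hjk : j ≤ k) (hk : k < ds.length)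
    (a b : Int) (ha : a = (j : Int)) (hb : b = (k : Int)) :
    (pvDpB ds os m).getD (a, b) PySem.Set.empty = pvG ds os j k := by
  subst hmm ha hb
  unfold pvDpB
  have hinit := pvInv_init ds os
  have hfin := pvInv_outer ds os (ds.length - 1) 2 1 _ (by norm_num) (le_refl 1)
    (by omega) hinit
  exact hfin j k hjk hk (by omega)

-- ---- the valid answer ----

-- ---- an even-length interval yields the empty set ----

theorem pvDfsA_empty (cs : List Char) :
    ∀ (fuel : Nat) (l r : Int), (r - l) % 2 = 1 → pvDfsA cs fuel l r = PySem.Set.empty := by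
  intro fuel
  induction fuel with
  | zero => intro l r _; rfl
  | succ f ih =>
    intro l r hodd
    rw [pvDfsA]
    rw [if_neg (by simp; omega)]
    have hstep : ∀ (acc : PySem.Set Int), ∀ i ∈ PySem.List.pyRange (l + 1) r 2,
        (fun ret i =>
          let vs0 := pvDfsA cs f l (i - 1)
          let vs1 := pvDfsA cs f (i + 1) r
          vs0.foldl (fun ret v0 =>
            vs1.foldl (fun ret v1 =>
              let vv := if pvSget cs i == '+' then v0 + v1 else v0 * v1
              if vv ≤ 1000 then PySem.Set.add ret vv else ret) ret) ret) acc i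
        = (fun (acc : PySem.Set Int) (_ : Int) => acc) acc i := by
      intro acc i hi
      obtain ⟨hi1, hi2, hdvd⟩ := (PySem.List.mem_pyRange_iff_of_pos (by norm_num) i).mp hi
      have h1 : (r - (i + 1)) % 2 = 1 := by omega
      simp only
      rw [ih (i + 1) r h1]
      simp [PySem.Set.empty]
    rw [PySem.List.foldl_congr_mem _ _ _ _ hstep, PySem.List.foldl_ignore]

-- ---- the two valid-answer loops agree (on every input) ----

theorem pvLoopRel : ∀ (cs : List Char) (q : List Int) (op : Char) (tot : Int)
    (cur : Option Int) (mult : Bool),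
    mult = (op == '*') →
    (∀ c, cur = some c → ∃ q0, q = q0 ++ [c] ∧ tot = q0.sum) →
    (cur = none → q = [] ∧ tot = 0) →
    ((cs.foldl (fun (st : List Int × Char) c =>
        if PySem.Chars.isdigit c then
          let v := pvIntCh c
          if st.2 == '*' then
            match PySem.List.pop? st.1 with
            | some (x, rest) => (rest ++ [v * x], st.2)
            | none => (st.1 ++ [v], st.2)
          else (st.1 ++ [v], st.2)
        else (st.1, c)) (q, op)).1.sum)
      = (((cs.foldl (fun (st : Int × Option Int × Bool) ch =>
          if PySem.Chars.isdigit ch then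
            let d := pvIntCh ch
            if st.2.2 && st.2.1.isSome then
              (st.1, st.2.1.map (· * d), st.2.2)
            else
              ((if st.2.1.isSome then st.1 + st.2.1.getD 0 else st.1), some d, st.2.2)
          else (st.1, st.2.1, ch == '*')) (tot, cur, mult)).1)
        + (((cs.foldl (fun (st : Int × Option Int × Bool) ch =>
          if PySem.Chars.isdigit ch then
            let d := pvIntCh ch
            if st.2.2 && st.2.1.isSome then
              (st.1, st.2.1.map (· * d), st.2.2)
            else
              ((if st.2.1.isSome then st.1 + st.2.1.getD 0 else st.1), some d, st.2.2)
          else (st.1, st.2.1, ch == '*')) (tot, cur, mult)).2.1.getD 0))) := by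
  intro cs
  induction cs with
  | nil =>
    intro q op tot cur mult hm hsome hnone
    match cur with
    | none =>
      obtain ⟨hq, ht⟩ := hnone rfl
      subst hq ht
      simp
    | some c =>
      obtain ⟨q0, hq, ht⟩ := hsome c rfl
      subst hq ht
      simp
  | cons ch t ih =>
    intro q op tot cur mult hm hsome hnone
    by_cases hd : PySem.Chars.isdigit ch = true
    · simp only [List.foldl_cons, hd, if_true]
      match cur with
      | none =>
        obtain ⟨hq, ht⟩ := hnone rfl
        subst hq ht
        have hb : (mult && Option.isSome (none : Option Int)) = false := by simp
        rw [hb]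
        have hA : (if (op == '*') = true then
            match PySem.List.pop? ([] : List Int) with
            | some (x, rest) => (rest ++ [pvIntCh ch * x], op)
            | none => (([] : List Int) ++ [pvIntCh ch], op)
          else (([] : List Int) ++ [pvIntCh ch], op)) = ([pvIntCh ch], op) := by
          by_cases hop : (op == '*') = true <;> simp [hop, PySem.List.pop?]
        rw [hA]
        simp only [Bool.false_eq_true, if_false, Option.isSome_none]
        exact ih [pvIntCh ch] op 0 (some (pvIntCh ch)) mult hm
          (fun c hc => ⟨[], by simpa using hc, rfl⟩) (by simp)
      | some c =>
        obtain ⟨q0, hq, ht⟩ := hsome c rfl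
        subst hq ht
        by_cases hop : (op == '*') = true
        · have hmt : mult = true := by rw [hm, hop]
          subst hmt
          rw [if_pos hop, PySem.List.pop?_last]
          have hb : (true && Option.isSome (some c)) = true := by simp
          rw [hb, if_pos rfl]
          simp only [Option.map_some]
          rw [mul_comm c (pvIntCh ch)]
          exact ih (q0 ++ [pvIntCh ch * c]) op q0.sum (some (pvIntCh ch * c)) true hm
            (fun c' hc' => ⟨q0, by simpa using hc', rfl⟩) (by simp)
        · have hmf : mult = false := by rw [hm]; simpa using hop
          subst hmf
          rw [if_neg hop]
          have hb : (false && Option.isSome (some c)) = false := by simp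
          rw [hb]
          simp only [Bool.false_eq_true, if_false, Option.isSome_some, if_pos, Option.getD_some]
          exact ih (q0 ++ [c] ++ [pvIntCh ch]) op (q0.sum + c) (some (pvIntCh ch)) false hm
            (fun c' hc' => ⟨q0 ++ [c], by simpa using hc', by simp⟩) (by simp)
    · simp only [List.foldl_cons, hd]
      simp only [Bool.false_eq_true, if_false]
      exact ih q ch tot cur (ch == '*') rfl hsome hnone

-- ---- the scoring loops ----

theorem pvScoreA (v : Int) (ss : PySem.Set Int) :
    ∀ (l : List Int) (acc : Int),
    (l.foldl (fun ans a =>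
      let ans := if PySem.Set.contains ss a then ans + 2 else ans
      if a == v then ans + 5 else ans) acc)
      = acc + 2 * (l.countP (fun a => PySem.Set.contains ss a) : Int) + 5 * (l.count v : Int) := by
  intro l
  induction l with
  | nil => intro acc; simp
  | cons a t ih =>
    intro acc
    simp only [List.foldl_cons, ih, List.countP_cons, List.count_cons]
    split_ifs <;> simp_all <;> push_cast <;> ring

theorem pvScoreB (ss : PySem.Set Int) :
    ∀ (l : List Int) (acc : Int),
    (l.foldl (fun ans a => if PySem.Set.contains ss a then ans + 2 else ans) acc)
      = acc + 2 * (l.countP (fun a => PySem.Set.contains ss a) : Int) := by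
  intro l
  induction l with
  | nil => intro acc; simp
  | cons a t ih =>
    intro acc
    simp only [List.foldl_cons, ih, List.countP_cons]
    split_ifs <;> simp_all <;> push_cast <;> ring

set_option maxHeartbeats 2000000 in
theorem scoreOfStudents_spec : Claim_equal_scoreOfStudents := by
  intro s answers hdom hpre
  unfold Spec_scoreOfStudents
  unfold scoreOfStudents scoreOfStudents_alt
  simp only [PySem.List.len_eq]
  have hV : (pvLoopA s.toList).1.sum
      = ((s.toList.foldl (fun (st : Int × Option Int × Bool) ch =>
          if PySem.Chars.isdigit ch then
            let d := pvIntCh ch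
            if st.2.2 && st.2.1.isSome then
              (st.1, st.2.1.map (· * d), st.2.2)
            else
              ((if st.2.1.isSome then st.1 + st.2.1.getD 0 else st.1), some d, st.2.2)
          else (st.1, st.2.1, ch == '*')) (0, none, false)).1
        + ((s.toList.foldl (fun (st : Int × Option Int × Bool) ch =>
          if PySem.Chars.isdigit ch then
            let d := pvIntCh ch
            if st.2.2 && st.2.1.isSome then
              (st.1, st.2.1.map (· * d), st.2.2)
            else
              ((if st.2.1.isSome then st.1 + st.2.1.getD 0 else st.1), some d, st.2.2)
          else (st.1, st.2.1, ch == '*')) (0, none, false)).2.1.getD 0)) := by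
    unfold pvLoopA
    exact pvLoopRel s.toList [] '+' 0 none false (by decide) (by simp) (by simp)
  by_cases hodd : s.toList.length % 2 = 1
  · have hcond : (PySem.Int.mod (PySem.Str.len s) 2 == 1) = true := by
      have hlen : s.toList.length = s.length := String.length_toList (s := s)
      simp [PySem.Str.len, PySem.Int.mod, Int.fmod_eq_emod]
      omega
    simp only [hcond, if_true]
    have hmlen : (pvDigitsB s.toList).length = (s.toList.length + 1) / 2 := pvDigitsB_len _
    have hn1 : 1 ≤ s.toList.length := by omega
    have hm1 : 1 ≤ (pvDigitsB s.toList).length := by omega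
    have hn : s.toList.length = 2 * (pvDigitsB s.toList).length - 1 := by omega
    have hA : pvDfsA s.toList s.toList.length 0 (PySem.Str.len s - 1)
        = pvG (pvDigitsB s.toList) (pvOpsB s.toList) 0 ((pvDigitsB s.toList).length - 1) := by
      apply pvDfsA_eq_G s.toList hodd
      · simp
      · show PySem.Str.len s - 1 = _
        simp only [PySem.Str.len]
        push_cast
        omega
      · omega
      · omega
      · omega
    have hB : (pvDpB (pvDigitsB s.toList) (pvOpsB s.toList) ((pvDigitsB s.toList).length : Int)).getD
          (0, ((pvDigitsB s.toList).length : Int) - 1) PySem.Set.empty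
        = pvG (pvDigitsB s.toList) (pvOpsB s.toList) 0 ((pvDigitsB s.toList).length - 1) := by
      apply pvDpB_correct (pvDigitsB s.toList) (pvOpsB s.toList) hm1 _ rfl 0
        ((pvDigitsB s.toList).length - 1) (by omega) (by omega)
      · simp
      · push_cast; omega
    rw [hA, hV]
    simp only [hB]
    rw [pvScoreA, pvScoreB, PySem.List.count_eq]
    ring
  · have hcond : (PySem.Int.mod (PySem.Str.len s) 2 == 1) = false := by
      have hlen : s.toList.length = s.length := String.length_toList (s := s)
      simp [PySem.Str.len, PySem.Int.mod, Int.fmod_eq_emod]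
      omega
    simp only [hcond, Bool.false_eq_true, if_false]
    have hA : pvDfsA s.toList s.toList.length 0 (PySem.Str.len s - 1) = PySem.Set.empty := by
      apply pvDfsA_empty
      simp only [PySem.Str.len]
      omega
    rw [hA, hV]
    rw [pvScoreA, pvScoreB, PySem.List.count_eq]
    ring
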